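-- pv_equiv track=rewrite | github.com/hmassareli/nano-gpt | lag_analysis.py | find_default_baseline_section
-- ===== SOURCE A (Python) =====
-- def is_canonical_baseline_section(section_name):
--     """Return True only for plain baseline variants, not baseline-derived experiments."""
--     lowered = section_name.strip().lower()
--     return lowered == "baseline" or lowered.startswith("baseline ")
--
-- def find_default_baseline_section(sections):
--     """Pick a baseline section automatically when possible."""
--     baseline_like = [section for section in sections if is_canonical_baseline_section(section)]
--     if len(baseline_like) == 1:
--         return baseline_like[0]
--     if len(baseline_like) > 1:
--         exact = [section for section in baseline_like if section.strip().lower() == "baseline"]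
--         if exact:
--             return exact[0]
--     return None
-- ===== SOURCE B (Python) =====
-- def find_default_baseline_section(sections):
--     """Pick a baseline section automatically when possible (single pass)."""
--     count = 0
--     first_match = None
--     first_exact = None
--     for section in sections:
--         lowered = section.strip().lower()
--         if lowered == "baseline" or lowered.startswith("baseline "):
--             count += 1
--             if first_match is None:
--                 first_match = section
--             if first_exact is None and lowered == "baseline":
--                 first_exact = section
--     if count == 1:
--         return first_match
--     if count > 1:
--         return first_exact
--     return None
-- ===== Notes on version B (the rewrite author's own statement) =====
-- stated objective: alternative
-- what changed: Replaced the two list comprehensions (build baseline_like, then filter it again for exact matches) with a single fused pass that maintains a count, the first baseline-like section and the first exact 'baseline' section with first-wins guards, deciding from those three values.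
import Mathlib
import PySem

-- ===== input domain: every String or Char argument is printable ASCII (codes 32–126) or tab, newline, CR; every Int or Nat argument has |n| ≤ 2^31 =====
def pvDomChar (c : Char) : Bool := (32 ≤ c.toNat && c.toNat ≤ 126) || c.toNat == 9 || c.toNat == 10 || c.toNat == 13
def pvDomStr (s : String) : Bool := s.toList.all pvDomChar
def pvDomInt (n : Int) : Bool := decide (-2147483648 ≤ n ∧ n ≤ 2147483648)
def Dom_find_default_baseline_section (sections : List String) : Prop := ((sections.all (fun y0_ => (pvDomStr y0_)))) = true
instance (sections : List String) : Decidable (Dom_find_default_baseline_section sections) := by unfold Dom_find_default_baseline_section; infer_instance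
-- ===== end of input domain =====

-- B fuses A's two list comprehensions into one pass keeping (count, first match, first exact); same cost, different decomposition.

-- ===== PORT A =====
def is_canonical_baseline_section (section_name : String) : Bool :=
  let lowered := PySem.Str.lower (PySem.Str.strip section_name)
  lowered == "baseline" || PySem.Str.startswith lowered "baseline "

def find_default_baseline_section (sections : List String) : Option String :=
  let baseline_like := sections.filter (fun s => is_canonical_baseline_section s)
  if baseline_like.length == 1 then
    PySem.List.pyGet? baseline_like 0
  else if baseline_like.length > 1 then
    let exact := baseline_like.filter (fun s => PySem.Str.lower (PySem.Str.strip s) == "baseline")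
    match exact with
    | [] => none
    | e :: _ => some e
  else none

-- ===== PORT B =====
-- the fused loop: state = (count, first_match, first_exact), first-wins guards as in Source B
def pvLoopB (sections : List String) : Nat × Option String × Option String :=
  sections.foldl
    (fun st s =>
      let lowered := PySem.Str.lower (PySem.Str.strip s)
      if lowered == "baseline" || PySem.Str.startswith lowered "baseline " then
        (st.1 + 1,
         (match st.2.1 with | none => some s | some x => some x),
         (if st.2.2.isNone && lowered == "baseline" then some s else st.2.2))
      else st)
    (0, none, none)

def find_default_baseline_section_alt (sections : List String) : Option String :=
  let st := pvLoopB sections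
  if st.1 == 1 then st.2.1
  else if st.1 > 1 then st.2.2
  else none

-- ===== PRECONDITION & SPEC =====
def Spec_find_default_baseline_section (sections : List String) (out : Option String) : Prop := out = find_default_baseline_section_alt sections
instance (sections : List String) (out : Option String) : Decidable (Spec_find_default_baseline_section sections out) := by unfold Spec_find_default_baseline_section; infer_instance

-- ===== CLAIM (what is proved, stated in full; the proofs are below) =====
def Claim_equal_find_default_baseline_section : Prop := ∀ (sections : List String), Dom_find_default_baseline_section sections → Spec_find_default_baseline_section sections (find_default_baseline_section sections)

-- ===== LEMMAS AND PROOFS =====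

def pvExactP (s : String) : Bool := PySem.Str.lower (PySem.Str.strip s) == "baseline"

-- invariant of B's fused loop: final state from any start state, in terms of A's two filters
lemma pvLoopB_inv (l : List String) (c : Nat) (fm fe : Option String) :
    l.foldl
      (fun st s =>
        let lowered := PySem.Str.lower (PySem.Str.strip s)
        if lowered == "baseline" || PySem.Str.startswith lowered "baseline " then
          (st.1 + 1,
           (match st.2.1 with | none => some s | some x => some x),
           (if st.2.2.isNone && lowered == "baseline" then some s else st.2.2))
        else st)
      (c, fm, fe)
    = (c + (l.filter (fun s => is_canonical_baseline_section s)).length,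
       fm.or ((l.filter (fun s => is_canonical_baseline_section s)).head?),
       fe.or ((l.filter (fun s => is_canonical_baseline_section s && pvExactP s)).head?)) := by
  induction l generalizing c fm fe with
  | nil => simp
  | cons s t ih =>
    simp only [List.foldl_cons]
    by_cases hc : is_canonical_baseline_section s = true
    · have hc' : (PySem.Str.lower (PySem.Str.strip s) == "baseline"
          || PySem.Str.startswith (PySem.Str.lower (PySem.Str.strip s)) "baseline ") = true := by
        simpa [is_canonical_baseline_section] using hc
      show List.foldl _ (if (PySem.Str.lower (PySem.Str.strip s) == "baseline"
          || PySem.Str.startswith (PySem.Str.lower (PySem.Str.strip s)) "baseline ") = true then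
            (c + 1,
             (match fm with | none => some s | some x => some x),
             (if (fe.isNone && (PySem.Str.lower (PySem.Str.strip s) == "baseline")) = true then some s else fe))
          else (c, fm, fe)) t = _
      rw [if_pos hc', ih]
      have hfm : (match fm with | none => some s | some x => some x) = fm.or (some s) := by
        cases fm <;> rfl
      by_cases he : pvExactP s = true
      · have hfe : (if (fe.isNone && (PySem.Str.lower (PySem.Str.strip s) == "baseline")) = true
            then some s else fe) = fe.or (some s) := by
          cases fe <;> simp [pvExactP] at he ⊢ <;> simp [he]
        rw [hfm, hfe]
        simp [hc, he, Nat.add_comm, Nat.add_left_comm]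
      · have hfe : (if (fe.isNone && (PySem.Str.lower (PySem.Str.strip s) == "baseline")) = true
            then some s else fe) = fe := by
          cases fe <;> simp [pvExactP] at he ⊢ <;> simp [he]
        rw [hfm, hfe]
        simp [hc, he, Nat.add_comm, Nat.add_left_comm]
    · have hc' : (PySem.Str.lower (PySem.Str.strip s) == "baseline"
          || PySem.Str.startswith (PySem.Str.lower (PySem.Str.strip s)) "baseline ") = false := by
        simpa [is_canonical_baseline_section] using hc
      simp only [hc', if_false, Bool.false_eq_true]
      rw [ih]
      simp [hc]

lemma pvFilter_exact (l : List String) :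
    ((l.filter (fun s => is_canonical_baseline_section s)).filter
        (fun s => PySem.Str.lower (PySem.Str.strip s) == "baseline"))
    = l.filter (fun s => is_canonical_baseline_section s && pvExactP s) := by
  rw [List.filter_filter]
  apply List.filter_congr
  intro x _
  simp [pvExactP, Bool.and_comm]

-- ===== VERDICT (by name: the statement is the Claim_ definition above) =====
theorem find_default_baseline_section_spec : Claim_equal_find_default_baseline_section := by
  intro sections _
  unfold Spec_find_default_baseline_section find_default_baseline_section find_default_baseline_section_alt pvLoopB
  rw [pvLoopB_inv]
  simp only [Nat.zero_add, Option.none_or]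
  rw [← pvFilter_exact]
  cases h : sections.filter (fun s => is_canonical_baseline_section s) with
  | nil => simp
  | cons x t =>
    cases t with
    | nil => simp [PySem.List.pyGet?, PySem.List.pyIdx?]
    | cons y u =>
      simp only [List.length_cons]
      have h2 : ¬ (u.length + 1 + 1 == 1) = true := by simp
      simp only [h2]
      have h3 : u.length + 1 + 1 > 1 := by omega
      simp only [h3, if_true, Bool.false_eq_true]
      cases hE : (x :: y :: u).filter (fun s => PySem.Str.lower (PySem.Str.strip s) == "baseline") with
      | nil => simp
      | cons e es => simp
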